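-- pv_equiv track=rewrite | github.com/christimchan/Coding-Samples | ECE 20875 Mini Project/MiniProjectPath1.py | daySort
-- ===== SOURCE A (Python) =====
-- def daySort (days, data):
--     sunday_Total = []
--     monday_Total = []
--     tuesday_Total = []
--     wednesday_Total = []
--     thursday_Total = []
--     friday_Total = []
--     saturday_Total = []
--
--     for i in range(len(days)):
--         if(days[i] == 'Sunday'):
--             sunday_Total.append(data[i])
--         elif(days[i] == 'Monday'):
--             monday_Total.append(data[i])
--         elif(days[i] == 'Tuesday'):
--             tuesday_Total.append(data[i])
--         elif(days[i] == 'Wednesday'):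
--             wednesday_Total.append(data[i])
--         elif(days[i] == 'Thursday'):
--             thursday_Total.append(data[i])
--         elif(days[i] == 'Friday'):
--             friday_Total.append(data[i])
--         elif(days[i] == 'Saturday'):
--             saturday_Total.append(data[i])
--
--     total_Days = [sunday_Total, monday_Total, tuesday_Total, wednesday_Total, thursday_Total, friday_Total, saturday_Total]
--
--     return total_Days
-- ===== SOURCE B (Python) =====
-- ORDER = ['Sunday', 'Monday', 'Tuesday', 'Wednesday', 'Thursday', 'Friday', 'Saturday']
--
--
-- def daySort(days, data):
--     # one filtering scan over the indices per weekday, in fixed weekday order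
--     return [[data[i] for i in range(len(days)) if days[i] == d] for d in ORDER]
-- ===== Notes on version B (the rewrite author's own statement) =====
-- stated objective: alternative
-- what changed: Replaced the single pass with a 7-way if/elif branch appending into seven named accumulator lists by a list of the seven weekday names mapped to seven independent filtering scans of the index range, assembling the result directly.
import Mathlib
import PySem

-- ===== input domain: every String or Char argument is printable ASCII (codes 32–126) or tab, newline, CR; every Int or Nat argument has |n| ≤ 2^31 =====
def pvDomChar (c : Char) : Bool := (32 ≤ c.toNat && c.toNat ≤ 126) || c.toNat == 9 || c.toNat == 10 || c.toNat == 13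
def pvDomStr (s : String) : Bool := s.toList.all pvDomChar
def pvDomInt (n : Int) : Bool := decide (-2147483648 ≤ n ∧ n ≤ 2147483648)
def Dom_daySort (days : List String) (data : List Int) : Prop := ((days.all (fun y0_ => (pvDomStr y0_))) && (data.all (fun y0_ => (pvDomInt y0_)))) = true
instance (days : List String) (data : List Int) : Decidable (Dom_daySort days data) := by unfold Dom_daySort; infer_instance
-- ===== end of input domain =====

-- B changes the decomposition: seven independent filtering scans in weekday order
-- instead of A's single branching pass into seven accumulators; equal cost ("alternative").

-- ===== PORT A =====
-- state: the seven accumulator lists; Option models the IndexError of data[i]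
-- (none = Python raised; unreachable under Pre_daySort)
def daySortStep (days : List String) (data : List Int)
    (acc : Option (List Int × List Int × List Int × List Int × List Int × List Int × List Int))
    (i : Int) :
    Option (List Int × List Int × List Int × List Int × List Int × List Int × List Int) :=
  match acc with
  | none => none
  | some (su, mo, tu, we, th, fr, sa) =>
    let d := PySem.List.pyGetD days i ""   -- i ∈ range(len(days)) is always in range
    if d = "Sunday" then (PySem.List.pyGet? data i).map (fun v => (su ++ [v], mo, tu, we, th, fr, sa))
    else if d = "Monday" then (PySem.List.pyGet? data i).map (fun v => (su, mo ++ [v], tu, we, th, fr, sa))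
    else if d = "Tuesday" then (PySem.List.pyGet? data i).map (fun v => (su, mo, tu ++ [v], we, th, fr, sa))
    else if d = "Wednesday" then (PySem.List.pyGet? data i).map (fun v => (su, mo, tu, we ++ [v], th, fr, sa))
    else if d = "Thursday" then (PySem.List.pyGet? data i).map (fun v => (su, mo, tu, we, th ++ [v], fr, sa))
    else if d = "Friday" then (PySem.List.pyGet? data i).map (fun v => (su, mo, tu, we, th, fr ++ [v], sa))
    else if d = "Saturday" then (PySem.List.pyGet? data i).map (fun v => (su, mo, tu, we, th, fr, sa ++ [v]))
    else some (su, mo, tu, we, th, fr, sa)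

def daySort (days : List String) (data : List Int) : List (List Int) :=
  match (PySem.List.pyRange 0 days.length 1).foldl (daySortStep days data)
      (some ([], [], [], [], [], [], [])) with
  | some (su, mo, tu, we, th, fr, sa) => [su, mo, tu, we, th, fr, sa]
  | none => []   -- Python raises IndexError here; excluded by Pre_daySort

-- ===== PORT B =====
def pvOrder : List String := ["Sunday", "Monday", "Tuesday", "Wednesday", "Thursday", "Friday", "Saturday"]

def daySort_alt (days : List String) (data : List Int) : List (List Int) :=
  pvOrder.map (fun d =>
    ((PySem.List.pyRange 0 days.length 1).filter (fun i => PySem.List.pyGetD days i "" == d)).map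
      (fun i => (PySem.List.pyGet? data i).getD 0))
      -- getD's default is unreachable under Pre_daySort (none = IndexError in Python)

-- ===== PRECONDITION & SPEC =====
-- Pre_ excludes exactly the inputs on which Python A raises IndexError:
-- an index whose day is one of the seven weekday names but which is out of range for data.
def Pre_daySort (days : List String) (data : List Int) : Prop :=
  ∀ i : Nat, i < days.length → days.getD i "" ∈ pvOrder → i < data.length
instance (days : List String) (data : List Int) : Decidable (Pre_daySort days data) := by
  unfold Pre_daySort; infer_instance

def pvWitness_daySort : List String × List Int := (["Monday", "xx", "Sunday"], [5, 6, 7])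

def Spec_daySort (days : List String) (data : List Int) (out : List (List Int)) : Prop := out = daySort_alt days data
instance (days : List String) (data : List Int) (out : List (List Int)) : Decidable (Spec_daySort days data out) := by unfold Spec_daySort; infer_instance

-- ===== CLAIM (what is proved, stated in full; the proofs are below) =====
def Claim_equal_daySort : Prop := ∀ (days : List String) (data : List Int), Dom_daySort days data → Pre_daySort days data → Spec_daySort days data (daySort days data)

-- ===== LEMMAS AND PROOFS =====

-- one bucket of B, over the index range [0, n)
def pvBkt (days : List String) (data : List Int) (d : String) (n : Nat) : List Int :=
  ((PySem.List.pyRange 0 n 1).filter (fun i => PySem.List.pyGetD days i "" == d)).map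
    (fun i => (PySem.List.pyGet? data i).getD 0)

lemma pvBkt_zero (days : List String) (data : List Int) (d : String) :
    pvBkt days data d 0 = [] := by
  simp [pvBkt]

lemma pvBkt_succ (days : List String) (data : List Int) (d : String) (n : Nat) :
    pvBkt days data d (n + 1)
      = pvBkt days data d n
        ++ (if days[n]?.getD "" = d then [data[n]?.getD 0] else []) := by
  unfold pvBkt
  have h : PySem.List.pyRange 0 ((n + 1 : Nat) : Int) 1
      = PySem.List.pyRange 0 (n : Int) 1 ++ [(n : Int)] := by
    push_cast
    exact PySem.List.pyRange_one_succ_right (by positivity)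
  rw [h, List.filter_append, List.map_append]
  by_cases hd : days[n]?.getD "" = d <;> simp [hd]

lemma daySort_fold (days : List String) (data : List Int)
    (pre : Pre_daySort days data) :
    ∀ n : Nat, n ≤ days.length →
      (PySem.List.pyRange 0 n 1).foldl (daySortStep days data) (some ([], [], [], [], [], [], []))
        = some (pvBkt days data "Sunday" n, pvBkt days data "Monday" n,
                pvBkt days data "Tuesday" n, pvBkt days data "Wednesday" n,
                pvBkt days data "Thursday" n, pvBkt days data "Friday" n,
                pvBkt days data "Saturday" n) := by
  intro n
  induction n with
  | zero =>
    intro _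
    simp [pvBkt_zero]
  | succ n ih =>
    intro h
    have hn : n ≤ days.length := Nat.le_of_succ_le h
    have hr : PySem.List.pyRange 0 ((n + 1 : Nat) : Int) 1
        = PySem.List.pyRange 0 (n : Int) 1 ++ [(n : Int)] := by
      push_cast
      exact PySem.List.pyRange_one_succ_right (by positivity)
    rw [hr, List.foldl_append, ih hn]
    simp only [List.foldl_cons, List.foldl_nil]
    unfold daySortStep
    have hD : days.getD n "" = days[n]?.getD "" := List.getD_eq_getElem?_getD
    have hsome : days[n]?.getD "" ∈ pvOrder →
        PySem.List.pyGet? data (n : Int) = some (data[n]?.getD 0) := by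
      intro hmem
      have hlt : n < data.length := pre n (Nat.lt_of_succ_le h) (by rw [hD]; exact hmem)
      rw [PySem.List.pyGet?_natCast]
      simp [List.getElem?_eq_getElem hlt]
    by_cases h1 : days[n]?.getD "" = "Sunday"
    · rw [hsome (by simp [h1, pvOrder])]
      simp [pvBkt_succ, h1]
    · by_cases h2 : days[n]?.getD "" = "Monday"
      · rw [hsome (by simp [h2, pvOrder])]
        simp [pvBkt_succ, h2]
      · by_cases h3 : days[n]?.getD "" = "Tuesday"
        · rw [hsome (by simp [h3, pvOrder])]
          simp [pvBkt_succ, h3]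
        · by_cases h4 : days[n]?.getD "" = "Wednesday"
          · rw [hsome (by simp [h4, pvOrder])]
            simp [pvBkt_succ, h4]
          · by_cases h5 : days[n]?.getD "" = "Thursday"
            · rw [hsome (by simp [h5, pvOrder])]
              simp [pvBkt_succ, h5]
            · by_cases h6 : days[n]?.getD "" = "Friday"
              · rw [hsome (by simp [h6, pvOrder])]
                simp [pvBkt_succ, h6]
              · by_cases h7 : days[n]?.getD "" = "Saturday"
                · rw [hsome (by simp [h7, pvOrder])]
                  simp [pvBkt_succ, h7]
                · simp [pvBkt_succ, h1, h2, h3, h4, h5, h6, h7]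

theorem daySort_spec_aux (days : List String) (data : List Int)
    (pre : Pre_daySort days data) :
    daySort days data = daySort_alt days data := by
  unfold daySort daySort_alt
  rw [daySort_fold days data pre days.length le_rfl]
  simp [pvOrder, pvBkt]

-- ===== VERDICT (by name: the statement is the Claim_ definition above) =====
theorem daySort_spec : Claim_equal_daySort := by
  intro days data _ pre
  unfold Spec_daySort
  exact daySort_spec_aux days data pre
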